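-- pv_equiv track=rewrite | github.com/t-ai-lab/yolo_train | run_api.py | split_numbers
-- ===== SOURCE A (Python) =====
-- def split_numbers(text):
--   ld = False
--
--   new_txt = ''
--
--   for i in range(len(text)):
--
--     if text[i].isdigit():
--       if ld==False:
--         new_txt+=' '
--         ld = True
--
--     else:
--       if ld==True:
--         new_txt+=' '
--         ld = False
--
--     new_txt+=text[i]
--   return new_txt
-- ===== SOURCE B (Python) =====
-- from itertools import groupby
--
-- def split_numbers(text):
--     pieces = []
--     prev = False
--     for is_digit, group in groupby(text, key=str.isdigit):
--         if is_digit != prev: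
--             pieces.append(' ')
--         pieces.append(''.join(group))
--         prev = is_digit
--     return ''.join(pieces)
-- ===== Notes on version B (the rewrite author's own statement) =====
-- stated objective: idiomatic
-- what changed: B splits the string into maximal digit/non-digit runs with itertools.groupby and emits one separator per run boundary (prev flag over runs) joined once, instead of A's per-character flag machine with character-by-character string concatenation.
import Mathlib
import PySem

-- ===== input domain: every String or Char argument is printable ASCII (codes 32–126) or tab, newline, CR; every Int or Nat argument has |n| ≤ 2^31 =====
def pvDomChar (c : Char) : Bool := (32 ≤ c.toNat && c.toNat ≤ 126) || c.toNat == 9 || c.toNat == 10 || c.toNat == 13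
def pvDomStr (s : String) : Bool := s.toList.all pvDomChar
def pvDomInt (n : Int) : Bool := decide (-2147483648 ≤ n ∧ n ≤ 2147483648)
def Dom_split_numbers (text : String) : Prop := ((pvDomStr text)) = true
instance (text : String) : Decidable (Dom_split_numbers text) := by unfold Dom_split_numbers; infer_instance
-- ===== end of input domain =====

-- B replaces A's per-character flag machine by a groupby over maximal digit/non-digit
-- runs with one separator per run boundary (objective: idiomatic).

-- ===== PORT A =====
-- A's loop body: state (ld, new_txt), one step per character of text (in order).
def pvStepA (st : Bool × List Char) (c : Char) : Bool × List Char :=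
  let (ld, acc) := st
  if PySem.Chars.isdigit c then
    if ld == false then (true, (acc ++ [' ']) ++ [c]) else (ld, acc ++ [c])
  else
    if ld == true then (false, (acc ++ [' ']) ++ [c]) else (ld, acc ++ [c])

def split_numbers (text : String) : String :=
  String.ofList (text.toList.foldl pvStepA (false, [])).2

-- ===== PORT B =====
-- itertools.groupby(text, key=str.isdigit): maximal runs tagged with their key.
def pvGroupby : List Char → List (Bool × List Char)
  | [] => []
  | c :: cs =>
    let k := PySem.Chars.isdigit c
    (k, c :: cs.takeWhile (fun d => PySem.Chars.isdigit d == k)) ::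
      pvGroupby (cs.dropWhile (fun d => PySem.Chars.isdigit d == k))
  termination_by cs => cs.length
  decreasing_by
    simpa using Nat.lt_succ_of_le (List.length_dropWhile_le _ _)

-- B's loop body over the groups: state (prev, pieces).
def pvStepB (st : Bool × List (List Char)) (g : Bool × List Char) : Bool × List (List Char) :=
  let (prev, pieces) := st
  (g.1, (if g.1 != prev then pieces ++ [[' ']] else pieces) ++ [g.2])

def split_numbers_alt (text : String) : String :=
  String.ofList ((pvGroupby text.toList).foldl pvStepB (false, [])).2.flatten

-- ===== PRECONDITION & SPEC =====
def Spec_split_numbers (text : String) (out : String) : Prop := out = split_numbers_alt text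
instance (text : String) (out : String) : Decidable (Spec_split_numbers text out) := by unfold Spec_split_numbers; infer_instance

-- ===== CLAIM (what is proved, stated in full; the proofs are below) =====
def Claim_equal_split_numbers : Prop := ∀ (text : String), Dom_split_numbers text → Spec_split_numbers text (split_numbers text)

-- ===== LEMMAS AND PROOFS =====

-- One step of A, uniformly over the four branches.
theorem pvStepA_eq (ld : Bool) (acc : List Char) (c : Char) :
    pvStepA (ld, acc) c =
      (PySem.Chars.isdigit c,
       acc ++ (if PySem.Chars.isdigit c != ld then [' '] else []) ++ [c]) := by
  cases h : PySem.Chars.isdigit c <;> cases ld <;> simp [pvStepA, h]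

-- A run whose characters all share the current flag passes through A's loop unchanged.
theorem foldl_stepA_run (run : List Char) (k : Bool) (acc : List Char)
    (h : ∀ c ∈ run, PySem.Chars.isdigit c = k) :
    run.foldl pvStepA (k, acc) = (k, acc ++ run) := by
  induction run generalizing acc with
  | nil => simp
  | cons c cs ih =>
    have hc : PySem.Chars.isdigit c = k := h c (by simp)
    rw [List.foldl_cons, pvStepA_eq, hc]
    simp only [bne_self_eq_false, Bool.false_eq_true, if_false, List.append_nil]
    rw [ih _ (fun d hd => h d (by simp [hd]))]
    simp

-- Main invariant: A's character loop equals B's group loop, given pieces.flatten = acc.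
theorem pv_main (cs : List Char) (ld : Bool) (acc : List Char) (pieces : List (List Char))
    (h : pieces.flatten = acc) :
    ((pvGroupby cs).foldl pvStepB (ld, pieces)).2.flatten = (cs.foldl pvStepA (ld, acc)).2 := by
  induction hn : cs.length using Nat.strong_induction_on generalizing cs ld acc pieces with
  | _ n ih =>
    cases cs with
    | nil => simpa [pvGroupby] using h
    | cons c rest =>
      rw [pvGroupby]
      set k := PySem.Chars.isdigit c with hk
      set grp := rest.takeWhile (fun d => PySem.Chars.isdigit d == k) with hgrp
      set rest' := rest.dropWhile (fun d => PySem.Chars.isdigit d == k) with hrest'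
      have hsplit : c :: rest = (c :: grp) ++ rest' := by
        simp [hgrp, hrest', List.takeWhile_append_dropWhile]
      have hrun : ∀ d ∈ c :: grp, PySem.Chars.isdigit d = k := by
        intro d hd
        rcases List.mem_cons.mp hd with rfl | hd
        · exact hk.symm
        · simpa using List.mem_takeWhile_imp hd
      -- A over the first run
      have hA : (c :: rest).foldl pvStepA (ld, acc) =
          rest'.foldl pvStepA (k, (acc ++ (if k != ld then [' '] else []) ++ [c]) ++ grp) := by
        rw [hsplit, List.foldl_append]
        congr 1
        rw [List.foldl_cons, pvStepA_eq, ← hk]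
        exact foldl_stepA_run grp k _ (fun d hd => hrun d (by simp [hd]))
      rw [hA]
      -- B over the first group
      rw [List.foldl_cons]
      have hlen : rest'.length < n := by
        have hle := List.length_dropWhile_le (fun d => PySem.Chars.isdigit d == k) rest
        rw [← hrest'] at hle
        simp only [List.length_cons] at hn
        omega
      refine ih rest'.length hlen rest' k _ _ ?_ rfl
      cases hb : (k != ld)
      · simp [h]
      · simp [h]

-- ===== VERDICT (by name: the statement is the Claim_ definition above) =====
theorem split_numbers_spec : Claim_equal_split_numbers := by
  intro text _
  unfold Spec_split_numbers split_numbers split_numbers_alt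
  rw [pv_main text.toList false [] [] rfl]
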